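-- pv_equiv track=rewrite | github.com/yehohnathan/WebPage_Challenge_Solutions | AdventJS_2024/20_encontrar_regalos_[facil].py | fix_gift_list
-- ===== SOURCE A (Python) =====
-- def fix_gift_list(received: list[str], expected: list[str]) -> dict[str, int]:
--     # Lista de regalos faltantes y sobrantes
--     gift_list = {"missing": {}, "extra": {}}
--
--     # Se recorren todos los regalos registrdos
--     for toy in set(received + expected):
--         if toy not in received:
--             gift_list.setdefault("missing", {})[toy] = expected.count(toy)
--         elif received.count(toy) < expected.count(toy):
--             gift_list.setdefault(
--                 "missing", {})[toy] = expected.count(toy) - received.count(toy)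
--         elif received.count(toy) > expected.count(toy):
--             gift_list.setdefault(
--                 "extra", {})[toy] = received.count(toy) - expected.count(toy)
--
--     return gift_list
-- ===== SOURCE B (Python) =====
-- def fix_gift_list(received: list[str], expected: list[str]) -> dict[str, int]:
--     # One pass: signed count per toy (expected minus received), then split by sign.
--     counts = {}
--     for toy in received:
--         counts[toy] = counts.get(toy, 0) - 1
--     for toy in expected:
--         counts[toy] = counts.get(toy, 0) + 1
--     missing = {toy: d for toy, d in counts.items() if d > 0}
--     extra = {toy: -d for toy, d in counts.items() if d < 0}
--     return {"missing": missing, "extra": extra}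
-- ===== Notes on version B (the rewrite author's own statement) =====
-- stated objective: faster
-- what changed: Replaces the scan over the union set with repeated list.count/membership scans per toy by a single pass building one signed counter (expected minus received) and splitting it by sign into missing/extra.
import Mathlib
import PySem

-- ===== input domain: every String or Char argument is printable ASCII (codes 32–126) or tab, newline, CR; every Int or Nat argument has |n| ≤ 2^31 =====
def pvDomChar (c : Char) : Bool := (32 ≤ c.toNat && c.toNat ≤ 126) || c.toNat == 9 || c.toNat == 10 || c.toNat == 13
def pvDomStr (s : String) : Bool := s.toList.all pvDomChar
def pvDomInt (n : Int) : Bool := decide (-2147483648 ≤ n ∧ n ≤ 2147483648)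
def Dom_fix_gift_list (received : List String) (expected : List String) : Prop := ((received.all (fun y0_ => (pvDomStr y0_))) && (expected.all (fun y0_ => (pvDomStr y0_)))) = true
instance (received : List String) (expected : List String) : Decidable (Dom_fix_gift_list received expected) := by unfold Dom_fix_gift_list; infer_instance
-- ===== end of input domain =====

-- ===== PORT A =====
-- Port of A. A iterates over a Python set (hash order, not modelled); here the set is
-- PySem.Set.ofList (first-occurrence order). B's port visits the same toys in the same order,
-- so the proved equality is order-exact for the ports; the Python dicts agree as dicts.
def fix_gift_list (received : List String) (expected : List String) : List (String × List (String × Int)) :=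
  let step := fun (gl : PySem.Dict String Int × PySem.Dict String Int) (toy : String) =>
    if received.contains toy = false then
      (gl.1.insert toy ((PySem.List.count expected toy : Int)), gl.2)
    else if (PySem.List.count received toy : Int) < (PySem.List.count expected toy : Int) then
      (gl.1.insert toy ((PySem.List.count expected toy : Int) - (PySem.List.count received toy : Int)), gl.2)
    else if (PySem.List.count received toy : Int) > (PySem.List.count expected toy : Int) then
      (gl.1, gl.2.insert toy ((PySem.List.count received toy : Int) - (PySem.List.count expected toy : Int)))
    else gl
  let gl := (PySem.Set.ofList (received ++ expected)).foldl step (PySem.Dict.empty, PySem.Dict.empty)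
  [("missing", gl.1.items), ("extra", gl.2.items)]

-- ===== PORT B =====
-- Port of B (Source B): one signed counter (expected minus received), then split by sign.
def fix_gift_list_alt (received : List String) (expected : List String) : List (String × List (String × Int)) :=
  let counts0 := received.foldl (fun d toy => d.insert toy (d.getD toy 0 - 1)) (PySem.Dict.empty : PySem.Dict String Int)
  let counts := expected.foldl (fun d toy => d.insert toy (d.getD toy 0 + 1)) counts0
  let missing := counts.items.filter (fun p => decide (p.2 > 0))
  let extra := (counts.items.filter (fun p => decide (p.2 < 0))).map (fun p => (p.1, -p.2))
  [("missing", missing), ("extra", extra)]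

-- ===== PRECONDITION & SPEC =====
def Spec_fix_gift_list (received : List String) (expected : List String) (out : List (String × List (String × Int))) : Prop := out = fix_gift_list_alt received expected
instance (received : List String) (expected : List String) (out : List (String × List (String × Int))) : Decidable (Spec_fix_gift_list received expected out) := by unfold Spec_fix_gift_list; infer_instance

-- ===== CLAIM (what is proved, stated in full; the proofs are below) =====
def Claim_equal_fix_gift_list : Prop := ∀ (received : List String) (expected : List String), Dom_fix_gift_list received expected → Spec_fix_gift_list received expected (fix_gift_list received expected)

-- ===== LEMMAS AND PROOFS =====

-- the signed balance of a toy
def pvBal (received expected : List String) (t : String) : Int :=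
  (PySem.List.count expected t : Int) - (PySem.List.count received t : Int)

theorem getD_foldl_insert_sub_one (l : List String) (d : PySem.Dict String Int) (v : String) :
    (l.foldl (fun d x => d.insert x (d.getD x 0 - 1)) d).getD v 0
      = d.getD v 0 - (PySem.List.count l v : Int) := by
  induction l generalizing d with
  | nil => simp [PySem.List.count]
  | cons x xs ih =>
      simp only [List.foldl_cons, ih, PySem.Dict.getD_insert, PySem.List.count, List.count_cons]
      rcases eq_or_ne v x with hv | hv
      · subst hv
        simp
        try omega
      · simp [hv, hv.symm]
        try omega

theorem getD_counts (received expected : List String) (v : String) :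
    (expected.foldl (fun d toy => d.insert toy (d.getD toy 0 + 1))
        (received.foldl (fun d toy => d.insert toy (d.getD toy 0 - 1))
          (PySem.Dict.empty : PySem.Dict String Int))).getD v 0
      = pvBal received expected v := by
  rw [PySem.Dict.getD_foldl_insert_add_one, getD_foldl_insert_sub_one, PySem.Dict.getD_empty]
  simp only [pvBal, PySem.List.count]
  omega

theorem keys_counts (received expected : List String) :
    (expected.foldl (fun d toy => d.insert toy (d.getD toy 0 + 1))
        (received.foldl (fun d toy => d.insert toy (d.getD toy 0 - 1))
          (PySem.Dict.empty : PySem.Dict String Int))).keys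
      = PySem.Set.ofList (received ++ expected) := by
  rw [PySem.Dict.keys_foldl_insert, PySem.Dict.keys_foldl_insert]
  simp [PySem.Dict.keys_empty, PySem.Set.update, PySem.Set.ofList, PySem.Set.empty, List.foldl_append]

theorem nodup_keys_counts (received expected : List String) :
    (expected.foldl (fun d toy => d.insert toy (d.getD toy 0 + 1))
        (received.foldl (fun d toy => d.insert toy (d.getD toy 0 - 1))
          (PySem.Dict.empty : PySem.Dict String Int))).keys.Nodup := by
  apply PySem.Dict.nodup_keys_foldl_insert
  apply PySem.Dict.nodup_keys_foldl_insert
  simp [PySem.Dict.keys_empty]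

-- the loop of A, characterised: over fresh nodup toys drawn from received ++ expected,
-- the two result dicts append exactly the positive/negative-balance toys in order.
theorem loopA (received expected : List String) (toys : List String)
    (m e : PySem.Dict String Int)
    (hnd : toys.Nodup)
    (hmem : ∀ t ∈ toys, t ∈ received ++ expected)
    (hm : ∀ t ∈ toys, m.contains t = false)
    (he : ∀ t ∈ toys, e.contains t = false) :
    (toys.foldl (fun gl toy =>
        if received.contains toy = false then
          (gl.1.insert toy ((PySem.List.count expected toy : Int)), gl.2)
        else if (PySem.List.count received toy : Int) < (PySem.List.count expected toy : Int) then
          (gl.1.insert toy ((PySem.List.count expected toy : Int) - (PySem.List.count received toy : Int)), gl.2)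
        else if (PySem.List.count received toy : Int) > (PySem.List.count expected toy : Int) then
          (gl.1, gl.2.insert toy ((PySem.List.count received toy : Int) - (PySem.List.count expected toy : Int)))
        else gl) (m, e)).1.items
      = m.items ++ (toys.filter (fun t => decide (0 < pvBal received expected t))).map
          (fun t => (t, pvBal received expected t)) ∧
    (toys.foldl (fun gl toy =>
        if received.contains toy = false then
          (gl.1.insert toy ((PySem.List.count expected toy : Int)), gl.2)
        else if (PySem.List.count received toy : Int) < (PySem.List.count expected toy : Int) then
          (gl.1.insert toy ((PySem.List.count expected toy : Int) - (PySem.List.count received toy : Int)), gl.2)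
        else if (PySem.List.count received toy : Int) > (PySem.List.count expected toy : Int) then
          (gl.1, gl.2.insert toy ((PySem.List.count received toy : Int) - (PySem.List.count expected toy : Int)))
        else gl) (m, e)).2.items
      = e.items ++ (toys.filter (fun t => decide (pvBal received expected t < 0))).map
          (fun t => (t, -pvBal received expected t)) := by
  induction toys generalizing m e with
  | nil => simp
  | cons toy rest ih =>
    have htoy_mem : toy ∈ received ++ expected := hmem toy List.mem_cons_self
    have hnotrest : toy ∉ rest := (List.nodup_cons.mp hnd).1
    have hndrest : rest.Nodup := (List.nodup_cons.mp hnd).2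
    have hmemrest : ∀ t ∈ rest, t ∈ received ++ expected := fun t ht => hmem t (List.mem_cons_of_mem _ ht)
    have hmtoy : m.contains toy = false := hm toy List.mem_cons_self
    have hetoy : e.contains toy = false := he toy List.mem_cons_self
    have hmrest : ∀ t ∈ rest, m.contains t = false := fun t ht => hm t (List.mem_cons_of_mem _ ht)
    have herest : ∀ t ∈ rest, e.contains t = false := fun t ht => he t (List.mem_cons_of_mem _ ht)
    have hmins : ∀ (v : Int), ∀ t ∈ rest, (m.insert toy v).contains t = false := by
      intro v t ht
      rw [PySem.Dict.contains_insert]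
      have : t ≠ toy := fun h => hnotrest (h ▸ ht)
      simp [this, hmrest t ht]
    have heins : ∀ (v : Int), ∀ t ∈ rest, (e.insert toy v).contains t = false := by
      intro v t ht
      rw [PySem.Dict.contains_insert]
      have : t ≠ toy := fun h => hnotrest (h ▸ ht)
      simp [this, herest t ht]
    simp only [List.foldl_cons, List.filter_cons]
    by_cases hr : received.contains toy = false
    · -- toy not in received: goes to missing with count expected toy
      have hnotin : toy ∉ received := by simpa using hr
      have hrc : PySem.List.count received toy = 0 := by
        rw [show PySem.List.count received toy = List.count toy received from rfl]
        exact List.count_eq_zero.mpr hnotin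
      have hein : toy ∈ expected := by
        rcases List.mem_append.mp htoy_mem with h | h
        · exact absurd h hnotin
        · exact h
      have hec : 0 < PySem.List.count expected toy := by
        rw [show PySem.List.count expected toy = List.count toy expected from rfl]
        exact List.count_pos_iff.mpr hein
      have hposf : decide (0 < pvBal received expected toy) = true := by
        simp only [pvBal, decide_eq_true_eq]; omega
      have hnegf : decide (pvBal received expected toy < 0) = false := by
        simp only [pvBal, decide_eq_false_iff_not, not_lt]; omega
      have hv : ((PySem.List.count expected toy : Int)) = pvBal received expected toy := by
        simp only [pvBal]; omega
      rw [if_pos hr, hv]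
      obtain ⟨ih1, ih2⟩ := ih (m.insert toy (pvBal received expected toy)) e
        hndrest hmemrest (hmins _) herest
      rw [ih1, ih2, PySem.Dict.items_insert_of_not_contains _ _ hmtoy]
      refine ⟨?_, ?_⟩ <;> simp [hposf, hnegf, List.append_assoc]
    · rw [if_neg hr]
      by_cases hlt : (PySem.List.count received toy : Int) < (PySem.List.count expected toy : Int)
      · have hposf : decide (0 < pvBal received expected toy) = true := by
          simp only [pvBal, decide_eq_true_eq]; omega
        have hnegf : decide (pvBal received expected toy < 0) = false := by
          simp only [pvBal, decide_eq_false_iff_not, not_lt]; omega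
        have hv : ((PySem.List.count expected toy : Int) - (PySem.List.count received toy : Int))
            = pvBal received expected toy := rfl
        rw [if_pos hlt, hv]
        obtain ⟨ih1, ih2⟩ := ih (m.insert toy (pvBal received expected toy)) e
          hndrest hmemrest (hmins _) herest
        rw [ih1, ih2, PySem.Dict.items_insert_of_not_contains _ _ hmtoy]
        refine ⟨?_, ?_⟩ <;> simp [hposf, hnegf, List.append_assoc]
      · rw [if_neg hlt]
        by_cases hgt : (PySem.List.count received toy : Int) > (PySem.List.count expected toy : Int)
        · have hposf : decide (0 < pvBal received expected toy) = false := by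
            simp only [pvBal, decide_eq_false_iff_not, not_lt]; omega
          have hnegf : decide (pvBal received expected toy < 0) = true := by
            simp only [pvBal, decide_eq_true_eq]; omega
          have hv : ((PySem.List.count received toy : Int) - (PySem.List.count expected toy : Int))
              = -pvBal received expected toy := by simp only [pvBal]; omega
          rw [if_pos hgt, hv]
          obtain ⟨ih1, ih2⟩ := ih m (e.insert toy (-pvBal received expected toy))
            hndrest hmemrest hmrest (heins _)
          rw [ih1, ih2, PySem.Dict.items_insert_of_not_contains _ _ hetoy]
          refine ⟨?_, ?_⟩ <;> simp [hposf, hnegf, List.append_assoc]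
        · have hposf : decide (0 < pvBal received expected toy) = false := by
            simp only [pvBal, decide_eq_false_iff_not, not_lt]; omega
          have hnegf : decide (pvBal received expected toy < 0) = false := by
            simp only [pvBal, decide_eq_false_iff_not, not_lt]; omega
          rw [if_neg hgt]
          obtain ⟨ih1, ih2⟩ := ih m e hndrest hmemrest hmrest herest
          rw [ih1, ih2]
          refine ⟨?_, ?_⟩ <;> simp [hposf, hnegf]

theorem items_counts (received expected : List String) :
    (expected.foldl (fun d toy => d.insert toy (d.getD toy 0 + 1))
        (received.foldl (fun d toy => d.insert toy (d.getD toy 0 - 1))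
          (PySem.Dict.empty : PySem.Dict String Int))).items
      = (PySem.Set.ofList (received ++ expected)).map
          (fun k => (k, pvBal received expected k)) := by
  refine (PySem.Dict.items_eq_map_keys _ (nodup_keys_counts received expected) (0 : Int)).trans ?_
  rw [keys_counts]
  exact List.map_congr_left (fun k _ => by rw [getD_counts])

-- ===== VERDICT (by name: the statement is the Claim_ definition above) =====
theorem fix_gift_list_spec : Claim_equal_fix_gift_list := by
  intro received expected _
  unfold Spec_fix_gift_list fix_gift_list fix_gift_list_alt
  obtain ⟨h1, h2⟩ := loopA received expected (PySem.Set.ofList (received ++ expected))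
    PySem.Dict.empty PySem.Dict.empty
    (PySem.Set.nodup_ofList _)
    (fun t ht => (PySem.Set.mem_ofList _ _).1 ht)
    (fun t _ => PySem.Dict.contains_empty t)
    (fun t _ => PySem.Dict.contains_empty t)
  have hemp : (PySem.Dict.empty : PySem.Dict String Int).items = ([] : List (String × Int)) := rfl
  simp only []
  rw [h1, h2, items_counts]
  simp [List.filter_map, Function.comp_def, hemp, pvBal]
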